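-- pv_equiv track=rewrite | github.com/LingB94/Target-Offer | 20表达数值的字符串.py | judgeInteger
-- ===== SOURCE A (Python) =====
-- def judgeInteger(s):
--     Allow = {'+','-','0','1','2','3','4','5','6','7','8','9'}
--     for i in range(len(s)):
--         if(s[i] not in Allow):
--             return False
--         if(s[i] in '+-' and i != 0):
--             return False
--     return True
-- ===== SOURCE B (Python) =====
-- def judgeInteger(s):
--     body = s[1:] if s[:1] in ('+', '-') else s
--     return all(c in '0123456789' for c in body)
-- ===== Notes on version B (the rewrite author's own statement) =====
-- stated objective: simpler
-- what changed: Replaces the per-index loop that re-checks membership and sign-position at every position with a single leading-sign peel followed by one uniform digit scan.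
import Mathlib
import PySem

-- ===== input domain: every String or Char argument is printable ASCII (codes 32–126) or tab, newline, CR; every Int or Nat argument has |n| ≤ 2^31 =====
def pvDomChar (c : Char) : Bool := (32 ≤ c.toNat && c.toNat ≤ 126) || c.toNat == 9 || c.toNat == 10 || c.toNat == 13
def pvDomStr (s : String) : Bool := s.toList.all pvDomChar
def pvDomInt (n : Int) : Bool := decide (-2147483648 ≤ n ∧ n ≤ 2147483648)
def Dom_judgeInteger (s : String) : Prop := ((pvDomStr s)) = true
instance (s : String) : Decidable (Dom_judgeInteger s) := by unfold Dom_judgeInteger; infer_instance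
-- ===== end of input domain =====

-- B peels one optional leading sign then does a single uniform digit scan, instead of A's
-- per-index loop checking membership and sign-position at every position (objective: simpler).


-- ===== PORT A =====
-- Allow = {'+','-','0',...,'9'}: membership in this fixed finite set
def pvAllow (c : Char) : Bool :=
  c ∈ ['+', '-', '0', '1', '2', '3', '4', '5', '6', '7', '8', '9']

-- the 'for i in range(len(s))' loop with early returns, as structural recursion
-- carrying the current index i
def judgeIntegerLoop : List Char → Nat → Bool
  | [], _ => true
  | c :: cs, i =>
    if ¬ pvAllow c then false
    else if (c == '+' || c == '-') && i ≠ 0 then false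
    else judgeIntegerLoop cs (i + 1)

def judgeInteger (s : String) : Bool := judgeIntegerLoop s.toList 0

-- ===== PORT B =====
def pvIsDig (c : Char) : Bool :=
  c ∈ ['0', '1', '2', '3', '4', '5', '6', '7', '8', '9']

-- body = s[1:] if s[:1] in ('+','-') else s  (s[:1] = first char if any);
-- then all(c in '0123456789' for c in body)
def judgeInteger_alt (s : String) : Bool :=
  let cs := s.toList
  let body := match cs with
    | c :: rest => if c == '+' || c == '-' then rest else cs
    | [] => cs
  body.all pvIsDig

-- ===== PRECONDITION & SPEC =====
def Spec_judgeInteger (s : String) (out : Bool) : Prop := out = judgeInteger_alt s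
instance (s : String) (out : Bool) : Decidable (Spec_judgeInteger s out) := by unfold Spec_judgeInteger; infer_instance

-- ===== CLAIM (what is proved, stated in full; the proofs are below) =====
def Claim_equal_judgeInteger : Prop := ∀ (s : String), Dom_judgeInteger s → Spec_judgeInteger s (judgeInteger s)

-- ===== LEMMAS AND PROOFS =====

lemma pvAllow_eq (c : Char) : pvAllow c = (pvIsDig c || c == '+' || c == '-') := by
  by_cases h1 : c = '+'
  · simp [pvAllow, pvIsDig, h1]
  · by_cases h2 : c = '-'
    · simp [pvAllow, pvIsDig, h2]
    · rw [beq_eq_false_iff_ne.mpr h1, beq_eq_false_iff_ne.mpr h2]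
      simp [pvAllow, pvIsDig, h1, h2]

-- from any nonzero index on, A's loop accepts exactly all-digits
lemma judgeIntegerLoop_pos (cs : List Char) (i : Nat) (hi : i ≠ 0) :
    judgeIntegerLoop cs i = cs.all pvIsDig := by
  induction cs generalizing i with
  | nil => rfl
  | cons c rest ih =>
    by_cases hd : pvIsDig c
    · have hp : c ≠ '+' := by rintro rfl; simp [pvIsDig] at hd
      have hm : c ≠ '-' := by rintro rfl; simp [pvIsDig] at hd
      simp [judgeIntegerLoop, pvAllow_eq, hd, hp, hm, List.all_cons, ih (i + 1) (by omega)]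
    · by_cases hp : c = '+'
      · subst hp; simp [judgeIntegerLoop, pvAllow_eq, List.all_cons, hd, hi]
      · by_cases hm : c = '-'
        · subst hm; simp [judgeIntegerLoop, pvAllow_eq, List.all_cons, hd, hi]
        · simp [judgeIntegerLoop, pvAllow_eq, List.all_cons, hd, hp, hm]

-- ===== VERDICT (by name: the statement is the Claim_ definition above) =====
theorem judgeInteger_spec : Claim_equal_judgeInteger := by
  intro s _
  unfold Spec_judgeInteger judgeInteger judgeInteger_alt
  cases hcs : s.toList with
  | nil => rfl
  | cons c rest =>
    by_cases hs : c = '+' ∨ c = '-'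
    · have hd : pvIsDig c = false := by
        rcases hs with rfl | rfl <;> simp [pvIsDig]
      have hsb : (c == '+' || c == '-') = true := by
        rcases hs with rfl | rfl <;> simp
      simp only [judgeIntegerLoop, pvAllow_eq, hd, hsb]
      simp only [judgeIntegerLoop_pos rest 1 (by omega)]
      simp [hsb]
    · rw [not_or] at hs
      obtain ⟨hp, hm⟩ := hs
      have hsb : (c == '+' || c == '-') = false := by simp [hp, hm]
      by_cases hd : pvIsDig c
      · simp only [judgeIntegerLoop, pvAllow_eq, hd, hsb]
        simp [judgeIntegerLoop_pos rest 1 (by omega), hd]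
      · simp [judgeIntegerLoop, pvAllow_eq, hd, hsb, List.all_cons]
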